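-- pv_equiv track=rewrite | github.com/Element23VM/nhlgoaldeconstruct | teamsfun.py | oneOff
-- ===== SOURCE A (Python) =====
-- def oneOff(reffy, newy):
--
--     for x in reffy:
--         if reffy[x] == max(reffy.values()):
--             t = reffy[x]
--             for y in reffy:
--                 if t == reffy[y]:
--                     newy.setdefault(y, t)
--                     return newy
-- ===== SOURCE B (Python) =====
-- def oneOff(reffy, newy):
--     # One pass: keep the running best (first key with strictly greatest value).
--     best_key = None
--     best_val = None
--     for k, v in reffy.items():
--         if best_key is None or v > best_val:
--             best_key, best_val = k, v
--     if best_key is None: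
--         return None
--     newy.setdefault(best_key, best_val)
--     return newy
-- ===== Notes on version B (the rewrite author's own statement) =====
-- stated objective: alternative
-- what changed: Replaces the nested scan (max(values) recomputed for every key, then a second full scan for the matching key) by a single pass keeping a running best key/value with strict '>'.
import Mathlib
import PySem

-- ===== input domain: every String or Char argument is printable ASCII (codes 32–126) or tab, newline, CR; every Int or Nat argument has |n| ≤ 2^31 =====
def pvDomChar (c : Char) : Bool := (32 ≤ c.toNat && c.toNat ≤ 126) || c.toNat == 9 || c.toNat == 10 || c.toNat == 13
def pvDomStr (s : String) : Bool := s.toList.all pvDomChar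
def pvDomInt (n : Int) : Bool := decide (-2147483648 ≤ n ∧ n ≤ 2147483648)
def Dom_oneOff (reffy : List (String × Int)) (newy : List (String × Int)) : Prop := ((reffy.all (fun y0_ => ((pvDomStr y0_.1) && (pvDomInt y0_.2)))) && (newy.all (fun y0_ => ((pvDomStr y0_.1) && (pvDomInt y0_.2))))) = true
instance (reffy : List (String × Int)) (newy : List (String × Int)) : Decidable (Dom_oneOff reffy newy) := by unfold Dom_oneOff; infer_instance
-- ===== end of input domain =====

-- B replaces A's nested scan (max(values) recomputed per key + a second full scan) by one
-- pass keeping the running best key/value; both mutate newy via setdefault identically,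
-- and the equivalence proved is about the return value.

-- ===== PORT A =====
-- inner loop: 'for y in reffy: if t == reffy[y]: newy.setdefault(y, t); return newy'
def oneOffInner (d newyd : PySem.Dict String Int) (t : Int) : List String → Option (List (String × Int))
  | [] => none
  | y :: ys =>
    if t = d.getD y 0 then some ((newyd.setdefault y t).items)
    else oneOffInner d newyd t ys

-- outer loop: 'for x in reffy: if reffy[x] == max(reffy.values()): …'
def oneOffOuter (d newyd : PySem.Dict String Int) : List String → Option (List (String × Int))
  | [] => none
  | x :: xs =>
    if PySem.List.max? d.values id = some (d.getD x 0) then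
      match oneOffInner d newyd (d.getD x 0) d.keys with
      | some r => some r
      | none => oneOffOuter d newyd xs
    else oneOffOuter d newyd xs

def oneOff (reffy : List (String × Int)) (newy : List (String × Int)) : Option (List (String × Int)) :=
  let d := PySem.Dict.ofList reffy
  oneOffOuter d (PySem.Dict.ofList newy) d.keys

-- ===== PORT B =====
-- loop body of Source B: 'if best_key is None or v > best_val: best_key, best_val = k, v'
def pvStep (acc : Option (String × Int)) (kv : String × Int) : Option (String × Int) :=
  match acc with
  | none => some kv
  | some b => if b.2 < kv.2 then some kv else some b

def oneOff_alt (reffy : List (String × Int)) (newy : List (String × Int)) : Option (List (String × Int)) :=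
  let d := PySem.Dict.ofList reffy
  match d.items.foldl pvStep none with
  | none => none
  | some (k, v) => some (((PySem.Dict.ofList newy).setdefault k v).items)

-- ===== PRECONDITION & SPEC =====
def Spec_oneOff (reffy : List (String × Int)) (newy : List (String × Int)) (out : Option (List (String × Int))) : Prop := out = oneOff_alt reffy newy
instance (reffy : List (String × Int)) (newy : List (String × Int)) (out : Option (List (String × Int))) : Decidable (Spec_oneOff reffy newy out) := by unfold Spec_oneOff; infer_instance

-- ===== CLAIM (what is proved, stated in full; the proofs are below) =====
def Claim_equal_oneOff : Prop := ∀ (reffy : List (String × Int)) (newy : List (String × Int)), Dom_oneOff reffy newy → Spec_oneOff reffy newy (oneOff reffy newy)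

-- ===== LEMMAS AND PROOFS =====

-- B's running best over a list, with a definite starting pair
def pvBestOf (p : String × Int) (l : List (String × Int)) : String × Int :=
  l.foldl (fun b q => if b.2 < q.2 then q else b) p

theorem pvFoldl_opt (l : List (String × Int)) (p : String × Int) :
    l.foldl pvStep (some p) = some (pvBestOf p l) := by
  induction l generalizing p with
  | nil => rfl
  | cons q l ih =>
    simp only [List.foldl_cons, pvBestOf]
    by_cases h : p.2 < q.2 <;> simp [pvStep, h, ih, pvBestOf]

theorem pvBestOf_mem : ∀ (l : List (String × Int)) (p : String × Int), pvBestOf p l ∈ p :: l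
  | [], p => by simp [pvBestOf]
  | q :: l, p => by
    have hstep : pvBestOf p (q :: l) = pvBestOf (if p.2 < q.2 then q else p) l := by
      simp [pvBestOf]
    rw [hstep]
    rcases List.mem_cons.mp (pvBestOf_mem l (if p.2 < q.2 then q else p)) with hm | hm
    · by_cases h : p.2 < q.2 <;> simp [h] at hm ⊢ <;> simp [hm]
    · simp [hm]

theorem pvBestOf_ge : ∀ (l : List (String × Int)) (p q : String × Int),
    q ∈ p :: l → q.2 ≤ (pvBestOf p l).2
  | [], p, q, hq => by
    rw [List.mem_singleton] at hq; simp [pvBestOf, hq]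
  | r :: l, p, q, hq => by
    have hstep : pvBestOf p (r :: l) = pvBestOf (if p.2 < r.2 then r else p) l := by
      simp [pvBestOf]
    rw [hstep]
    have hp' : p.2 ≤ (if p.2 < r.2 then r else p).2 ∧ r.2 ≤ (if p.2 < r.2 then r else p).2 := by
      by_cases h : p.2 < r.2 <;> simp [h] <;> omega
    have hhead := pvBestOf_ge l (if p.2 < r.2 then r else p) (if p.2 < r.2 then r else p)
      (by simp)
    rcases List.mem_cons.mp hq with h1 | h1
    · subst h1; omega
    rcases List.mem_cons.mp h1 with h2 | h2
    · subst h2; omega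
    · exact pvBestOf_ge l _ q (List.mem_cons_of_mem _ h2)

theorem pvBestOf_find : ∀ (l : List (String × Int)) (p : String × Int),
    (p :: l).find? (fun q => decide ((pvBestOf p l).2 ≤ q.2)) = some (pvBestOf p l)
  | [], p => by simp [pvBestOf]
  | q :: l, p => by
    by_cases h : p.2 < q.2
    · have hb : pvBestOf p (q :: l) = pvBestOf q l := by simp [pvBestOf, h]
      rw [hb]
      have hqb : q.2 ≤ (pvBestOf q l).2 := pvBestOf_ge l q q (by simp)
      rw [List.find?_cons_of_neg (by simp; omega)]
      exact pvBestOf_find l q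
    · have hb : pvBestOf p (q :: l) = pvBestOf p l := by simp [pvBestOf, h]
      rw [hb]
      have ih := pvBestOf_find l p
      by_cases hbp : (pvBestOf p l).2 ≤ p.2
      · have h1 : (p :: l).find? (fun r => decide ((pvBestOf p l).2 ≤ r.2)) = some p :=
          List.find?_cons_of_pos (by simpa using hbp)
        have hpb : pvBestOf p l = p := by
          have := h1 ▸ ih; injection this.symm
        rw [List.find?_cons_of_pos (by simpa using hbp), hpb]
      · have hnq : ¬ ((pvBestOf p l).2 ≤ q.2) := by omega
        rw [List.find?_cons_of_neg (by simpa using hbp),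
            List.find?_cons_of_neg (by simpa using hnq)]
        rw [List.find?_cons_of_neg (by simpa using hbp)] at ih
        exact ih

theorem pvInner_char (d newyd : PySem.Dict String Int) (t : Int) (ys : List String) :
    oneOffInner d newyd t ys =
      match ys.find? (fun y => decide (t = d.getD y 0)) with
      | some y => some ((newyd.setdefault y t).items)
      | none => none := by
  induction ys with
  | nil => rfl
  | cons y ys ih =>
    by_cases h : t = d.getD y 0 <;> simp [oneOffInner, h, ih]

theorem pvOuter_char (d newyd : PySem.Dict String Int) (m : Int)
    (hm : PySem.List.max? d.values id = some m)
    (hy : ∃ y ∈ d.keys, d.getD y 0 = m) :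
    ∀ xs : List String, (∃ x ∈ xs, d.getD x 0 = m) →
      oneOffOuter d newyd xs = oneOffInner d newyd m d.keys := by
  intro xs hx
  induction xs with
  | nil => simp at hx
  | cons x xs ih =>
    by_cases h : d.getD x 0 = m
    · have hcond : PySem.List.max? d.values id = some (d.getD x 0) := by rw [h]; exact hm
      simp only [oneOffOuter, hcond, if_pos, h]
      have hsome : oneOffInner d newyd m d.keys ≠ none := by
        rw [pvInner_char]
        obtain ⟨y, hyk, hyv⟩ := hy
        have : d.keys.find? (fun y => decide (m = d.getD y 0)) ≠ none := by
          intro hnone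
          have := List.find?_eq_none.mp hnone y hyk
          simp [hyv] at this
        cases hfind : d.keys.find? (fun y => decide (m = d.getD y 0)) with
        | none => exact absurd hfind this
        | some y' => simp
      cases hinner : oneOffInner d newyd m d.keys with
      | none => exact absurd hinner hsome
      | some r => simp
    · have hcond : ¬ (PySem.List.max? d.values id = some (d.getD x 0)) := by
        rw [hm]; intro hc; exact h (by injection hc with hc; omega)
      simp only [oneOffOuter, hcond]
      apply ih
      rcases hx with ⟨x', hmem, hvx'⟩
      rcases List.mem_cons.mp hmem with rfl | hmem'
      · exact absurd hvx' h
      · exact ⟨x', hmem', hvx'⟩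

theorem pvFind_congr {α : Type} (l : List α) (p q : α → Bool)
    (h : ∀ a ∈ l, p a = q a) : l.find? p = l.find? q := by
  induction l with
  | nil => rfl
  | cons a l ih =>
    simp only [List.find?_cons, h a (by simp)]
    cases q a <;> simp [ih (fun a ha => h a (by simp [ha]))]

-- ===== VERDICT (by name: the statement is the Claim_ definition above) =====
theorem oneOff_spec : Claim_equal_oneOff := by
  intro reffy newy _
  unfold Spec_oneOff oneOff oneOff_alt
  set d := PySem.Dict.ofList reffy with hd
  have hnd : d.keys.Nodup := PySem.Dict.nodup_keys_ofList reffy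
  cases hl : d.items with
  | nil =>
    have hk : d.keys = [] := by simp [PySem.Dict.keys, hl]
    simp [hk, hl, oneOffOuter]
  | cons h tl =>
    have hkeys : d.keys = (h :: tl).map (·.1) := by simp [PySem.Dict.keys, hl]
    have hvals : d.values = (h :: tl).map (·.2) := by simp [PySem.Dict.values, hl]
    set r := pvBestOf h tl with hr
    -- B's value
    have hB : d.items.foldl pvStep none = some r := by
      rw [hl]; simpa using pvFoldl_opt tl h
    -- the maximum
    have hrmem : r ∈ h :: tl := pvBestOf_mem tl h
    have hrd : ∀ q ∈ h :: tl, d.getD q.1 0 = q.2 := by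
      intro q hq
      exact PySem.Dict.getD_of_mem_items d (by rw [hl]; exact hq) hnd 0
    cases hmx : PySem.List.max? d.values id with
    | none =>
      rw [PySem.List.max?_eq_none_iff] at hmx
      rw [hvals] at hmx; simp at hmx
    | some m =>
      have hmmem : m ∈ d.values := PySem.List.max?_mem hmx
      have hmmax : ∀ v ∈ d.values, v ≤ m := by
        intro v hv; simpa using PySem.List.max?_isMax hmx v hv
      have hmr : m = r.2 := by
        have h1 : r.2 ≤ m := hmmax r.2 (by rw [hvals]; exact List.mem_map_of_mem hrmem)
        have h2 : m ≤ r.2 := by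
          rw [hvals] at hmmem
          obtain ⟨q, hq, hq2⟩ := List.mem_map.mp hmmem
          exact hq2 ▸ pvBestOf_ge tl h q hq
        omega
      -- A's loop
      have hy : ∃ y ∈ d.keys, d.getD y 0 = m := by
        refine ⟨r.1, ?_, by rw [hrd r hrmem, hmr]⟩
        rw [hkeys]; exact List.mem_map_of_mem hrmem
      have hA := pvOuter_char d (PySem.Dict.ofList newy) m hmx hy d.keys hy
      rw [hA, pvInner_char]
      have hfind : d.keys.find? (fun y => decide (m = d.getD y 0))
          = ((h :: tl).find? (fun q => decide (m = d.getD q.1 0))).map (·.1) := by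
        rw [hkeys, List.find?_map]; rfl
      have hcongr : (h :: tl).find? (fun q => decide (m = d.getD q.1 0))
          = (h :: tl).find? (fun q => decide (r.2 ≤ q.2)) := by
        apply pvFind_congr
        intro q hq
        have hqle : q.2 ≤ m := hmmax q.2 (by rw [hvals]; exact List.mem_map_of_mem hq)
        rw [hrd q hq]
        by_cases he : m = q.2 <;> simp [he] <;> omega
      rw [hfind, hcongr, pvBestOf_find tl h]
      simp only [hB]
      simp [hr, hmr]
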